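-- pv_equiv track=rewrite | github.com/Shlw/Naive-SAT-Solver | src/parser.py | formalize
-- ===== SOURCE A (Python) =====
-- def formalize(lst):
--     ret = [[]]
--     n = 0
--     for x in lst:
--         if x:
--             ret[n].append(x)
--         else:
--             ret.append([])
--             n += 1
--     while [] in ret:
--         ret.remove([])
--     return ret
-- ===== SOURCE B (Python) =====
-- def formalize(lst):
--     out = []
--     cur = []
--     for x in lst:
--         if x:
--             cur.append(x)
--         elif cur:
--             out.append(cur)
--             cur = []
--     if cur:
--         out.append(cur)
--     return out
-- ===== Notes on version B (the rewrite author's own statement) =====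
-- stated objective: simpler
-- what changed: B emits each non-empty group at its delimiter in a single pass with an (out, cur) accumulator and never creates empty groups, replacing A's append-empties-then-repeatedly-scan-and-remove ('while [] in ret: ret.remove([])') post-processing.
import Mathlib
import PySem

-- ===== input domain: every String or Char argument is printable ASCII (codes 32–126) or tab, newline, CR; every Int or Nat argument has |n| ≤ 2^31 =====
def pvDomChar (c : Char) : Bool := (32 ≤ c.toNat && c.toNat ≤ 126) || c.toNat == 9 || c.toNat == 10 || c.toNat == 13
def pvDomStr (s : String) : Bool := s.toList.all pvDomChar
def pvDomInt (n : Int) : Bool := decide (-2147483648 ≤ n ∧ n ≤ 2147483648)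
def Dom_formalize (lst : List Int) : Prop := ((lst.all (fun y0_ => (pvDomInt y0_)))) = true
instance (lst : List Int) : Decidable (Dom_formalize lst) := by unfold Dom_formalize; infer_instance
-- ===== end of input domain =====

-- B replaces A's append-empty-groups-then-repeatedly-scan-and-remove post-pass by a single
-- pass that emits each non-empty group at its delimiter and never creates empty groups (simpler).


-- ===== PORT A =====
-- loop body: 'if x: ret[n].append(x) else: ret.append([]); n += 1'
-- ('ret[n].append(x)' is in-place modification of the n-th group; n is always len(ret)-1, in range,
--  so List.modify is exact here)
def formalizeStep (st : List (List Int) × Nat) (x : Int) : List (List Int) × Nat :=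
  if x ≠ 0 then (st.1.modify st.2 (fun g => g ++ [x]), st.2)
  else (st.1 ++ [[]], st.2 + 1)

-- 'while [] in ret: ret.remove([])' — removes the first empty group while one exists
def formalizeRemove (ret : List (List Int)) : List (List Int) :=
  if _h : [] ∈ ret then formalizeRemove (ret.erase []) else ret
termination_by ret.length
decreasing_by
  have h1 := List.length_erase_of_mem _h
  have h2 : 0 < ret.length := List.length_pos_of_mem _h
  omega

def formalize (lst : List Int) : List (List Int) :=
  formalizeRemove (lst.foldl formalizeStep ([[]], 0)).1

-- ===== PORT B =====
-- loop body: 'if x: cur.append(x) elif cur: out.append(cur); cur = []'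
def formalizeAltStep (st : List (List Int) × List Int) (x : Int) : List (List Int) × List Int :=
  if x ≠ 0 then (st.1, st.2 ++ [x])
  else if st.2 ≠ [] then (st.1 ++ [st.2], [])
  else st

def formalize_alt (lst : List Int) : List (List Int) :=
  let st := lst.foldl formalizeAltStep ([], [])
  if st.2 ≠ [] then st.1 ++ [st.2] else st.1

-- ===== PRECONDITION & SPEC =====
def Spec_formalize (lst : List Int) (out : List (List Int)) : Prop := out = formalize_alt lst
instance (lst : List Int) (out : List (List Int)) : Decidable (Spec_formalize lst out) := by unfold Spec_formalize; infer_instance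

-- ===== CLAIM (what is proved, stated in full; the proofs are below) =====
def Claim_equal_formalize : Prop := ∀ (lst : List Int), Dom_formalize lst → Spec_formalize lst (formalize lst)

-- ===== LEMMAS AND PROOFS =====

-- the groups A's loop builds, before the removal pass: split at zeros, keeping empty groups
def pvBuild (cur : List Int) : List Int → List (List Int)
  | [] => [cur]
  | x :: xs => if x ≠ 0 then pvBuild (cur ++ [x]) xs else cur :: pvBuild [] xs

theorem pvModify_append (done : List (List Int)) (cur : List Int) (f : List Int → List Int) :
    (done ++ [cur]).modify done.length f = done ++ [f cur] := by
  induction done with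
  | nil => simp [List.modify]
  | cons d ds ih => simpa [List.modify] using ih

theorem pvFoldA (lst : List Int) : ∀ (done : List (List Int)) (cur : List Int),
    (lst.foldl formalizeStep (done ++ [cur], done.length)).1 = done ++ pvBuild cur lst := by
  induction lst with
  | nil => intro done cur; simp [pvBuild]
  | cons x xs ih =>
    intro done cur
    by_cases hx : x = 0
    · subst hx
      have h1 : formalizeStep (done ++ [cur], done.length) 0
          = ((done ++ [cur]) ++ [[]], (done ++ [cur]).length) := by
        simp [formalizeStep]
      rw [List.foldl_cons, h1, ih]
      simp [pvBuild]
    · have h1 : formalizeStep (done ++ [cur], done.length) x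
          = (done ++ [cur ++ [x]], done.length) := by
        simp [formalizeStep, hx, pvModify_append]
      rw [List.foldl_cons, h1, ih]
      simp [pvBuild, hx]

theorem pvRemove_eq_filter (ret : List (List Int)) :
    formalizeRemove ret = ret.filter (· ≠ []) := by
  induction hL : ret.length using Nat.strong_induction_on generalizing ret with
  | _ n ih =>
    by_cases h : ([] : List Int) ∈ ret
    · rw [formalizeRemove, dif_pos h]
      have hlen : (ret.erase []).length < ret.length := by
        have := List.length_erase_of_mem h
        have := List.length_pos_of_mem h
        omega
      have hfe : (ret.erase []).filter (· ≠ []) = ret.filter (· ≠ []) := by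
        clear ih hlen hL
        induction ret with
        | nil => simp
        | cons g gs ihg =>
          by_cases hg : g = ([] : List Int)
          · subst hg; simp
          · have hb : ((g == ([] : List Int)) : Bool) = false := by simpa using hg
            have hmem : ([] : List Int) ∈ gs := by
              rcases List.mem_cons.mp h with h' | h'
              · exact absurd h'.symm hg
              · exact h'
            simp only [List.erase_cons, hb, List.filter_cons]
            simpa [hg] using ihg hmem
      rw [ih _ (hL ▸ hlen) _ rfl, hfe]
    · rw [formalizeRemove, dif_neg h]
      exact (List.filter_eq_self.mpr (fun g hg => by
        simp only [ne_eq, decide_eq_true_eq]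
        exact fun hge => h (hge ▸ hg))).symm

theorem pvFoldB (lst : List Int) : ∀ (out : List (List Int)) (cur : List Int),
    (if (lst.foldl formalizeAltStep (out, cur)).2 ≠ [] then
        (lst.foldl formalizeAltStep (out, cur)).1 ++ [(lst.foldl formalizeAltStep (out, cur)).2]
      else (lst.foldl formalizeAltStep (out, cur)).1)
      = out ++ (pvBuild cur lst).filter (· ≠ []) := by
  induction lst with
  | nil =>
    intro out cur
    by_cases hc : cur = ([] : List Int) <;> simp [pvBuild, hc]
  | cons x xs ih =>
    intro out cur
    by_cases hx : x = 0
    · subst hx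
      by_cases hc : cur = ([] : List Int)
      · subst hc
        have h1 : formalizeAltStep (out, ([] : List Int)) 0 = (out, []) := by
          simp [formalizeAltStep]
        rw [List.foldl_cons, h1, ih]
        simp [pvBuild]
      · have h1 : formalizeAltStep (out, cur) 0 = (out ++ [cur], []) := by
          simp [formalizeAltStep, hc]
        rw [List.foldl_cons, h1, ih]
        simp [pvBuild, hc]
    · have h1 : formalizeAltStep (out, cur) x = (out, cur ++ [x]) := by
        simp [formalizeAltStep, hx]
      rw [List.foldl_cons, h1, ih]
      simp [pvBuild, hx]

-- ===== VERDICT (by name: the statement is the Claim_ definition above) =====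
theorem formalize_spec : Claim_equal_formalize := by
  intro lst _
  unfold Spec_formalize formalize formalize_alt
  have hA := pvFoldA lst [] []
  simp only [List.nil_append, List.length_nil] at hA
  rw [hA, pvRemove_eq_filter]
  have hB := pvFoldB lst [] []
  simpa using hB.symm
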